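-- pv_equiv track=rewrite | github.com/gvdr/INV_anomaly_package | outlierdetection/src/outlierdetection/univariate.py | GetOutlierTypes
-- ===== SOURCE A (Python) =====
-- def GetOutlierTypes(preprocessor):
--     """
--     Create a descriptive string of the outlier type that a detector with the given preprocessor directives would detect.
--
--     Parameters
--     ----------
--     preprocessor : list
--         preprocessor directives for a detector
--
--     Returns
--     -------
--     answer : string
--         description of outlier type to be used further in creating messages describing the outlier type.
--     """
--
--     density = False
--     average_period = -1
--     seasonal = False
--     seasonal_period = -1
--     restrict = False
--     restrict_period = 0
--     ARIMA = False
--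
--     for p in preprocessor:
--         type = p[0]
--         if type == 'season_subtract':
--             seasonal = True
--             seasonal_period = max(seasonal_period, p[1][0])
--         if type == 'average':
--             density = True
--             average_period = max(average_period, p[1][0])
--         if type == 'restrict_data_to':
--             restrict = True
--             restrict_period += p[1][0]
--         if type == 'ARIMA_subtract':
--             ARIMA = True
--             ARIMA_param = f"[{p[1][0]},{p[1][1]},{p[1][2]}]"
--
--     answer = ""
--
--     if seasonal:
--         answer += f" seasonal ({seasonal_period})"
--     if density:
--         answer += f" density ({average_period})"
--     if ARIMA:
--         answer += f" ARIMA ({ARIMA_param})"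
--     answer += " outlier"
--     if restrict:
--         answer += f" with comparison window restricted to last {restrict_period} datapoints"
--
--     answer = answer.lstrip()
--
--     answer = answer[0].upper() + answer[1:]
--     #if answer[0].islower():
--     #    answer[0] = answer[0].capitalize()
--
--     return answer
-- ===== SOURCE B (Python) =====
-- def GetOutlierTypes(preprocessor):
--     seasonal_vals = [p[1][0] for p in preprocessor if p[0] == 'season_subtract']
--     average_vals = [p[1][0] for p in preprocessor if p[0] == 'average']
--     restrict_vals = [p[1][0] for p in preprocessor if p[0] == 'restrict_data_to']
--     arima_args = [p[1] for p in preprocessor if p[0] == 'ARIMA_subtract']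
--
--     parts = []
--     if seasonal_vals:
--         parts.append(f"seasonal ({max([-1] + seasonal_vals)})")
--     if average_vals:
--         parts.append(f"density ({max([-1] + average_vals)})")
--     if arima_args:
--         a = arima_args[-1]
--         parts.append(f"ARIMA ([{a[0]},{a[1]},{a[2]}])")
--     parts.append("outlier")
--
--     answer = " ".join(parts)
--     if restrict_vals:
--         answer += f" with comparison window restricted to last {sum(restrict_vals)} datapoints"
--
--     return answer[0].upper() + answer[1:]
-- ===== Notes on version B (the rewrite author's own statement) =====
-- stated objective: simpler
-- what changed: A's single fused accumulate-then-format loop over eight mutable state variables is replaced by independent per-category filtered passes (max over season/average matches, sum over restrict matches, last ARIMA match) whose parts are assembled with ' '.join, so no leading-space lstrip bookkeeping is needed.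
import Mathlib
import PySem

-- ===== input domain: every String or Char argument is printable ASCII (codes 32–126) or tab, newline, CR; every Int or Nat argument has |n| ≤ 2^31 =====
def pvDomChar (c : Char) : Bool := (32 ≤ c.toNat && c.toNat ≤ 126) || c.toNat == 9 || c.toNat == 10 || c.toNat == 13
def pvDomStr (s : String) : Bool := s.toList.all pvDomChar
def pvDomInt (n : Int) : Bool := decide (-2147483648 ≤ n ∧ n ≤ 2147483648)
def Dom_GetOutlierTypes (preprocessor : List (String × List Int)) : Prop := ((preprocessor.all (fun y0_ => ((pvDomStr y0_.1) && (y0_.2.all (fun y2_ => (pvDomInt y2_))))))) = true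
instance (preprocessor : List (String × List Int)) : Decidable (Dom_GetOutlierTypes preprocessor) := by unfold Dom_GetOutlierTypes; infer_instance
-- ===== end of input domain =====

-- B replaces A's single fused accumulate-then-format loop by independent per-category
-- filtered passes whose results are joined with " ".join (objective: simpler decomposition).

-- ===== PORT A =====
-- answer[0].upper() + answer[1:]  — the identical final line of both Pythons (never-reached none arm: answer is never empty)
def pvCapitalize (answer : String) : String :=
  match PySem.Str.pyGet? answer 0 with
  | some c => String.ofList [PySem.Chars.upperChar c] ++ PySem.Str.slice answer (some 1) none
  | none => ""

-- f"[{p[1][0]},{p[1][1]},{p[1][2]}]"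
def pvFmt (a : List Int) : String :=
  "[" ++ PySem.Int.toStr (PySem.List.pyGetD a 0 0) ++ "," ++
  PySem.Int.toStr (PySem.List.pyGetD a 1 0) ++ "," ++
  PySem.Int.toStr (PySem.List.pyGetD a 2 0) ++ "]"

structure PvStA where
  density : Bool
  averagePeriod : Int
  seasonal : Bool
  seasonalPeriod : Int
  restrict : Bool
  restrictPeriod : Int
  arima : Bool
  arimaParam : String
deriving Repr

def pvStepA (s : PvStA) (p : String × List Int) : PvStA :=
  let s := if p.1 == "season_subtract" then
    { s with seasonal := true, seasonalPeriod := max s.seasonalPeriod (PySem.List.pyGetD p.2 0 0) } else s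
  let s := if p.1 == "average" then
    { s with density := true, averagePeriod := max s.averagePeriod (PySem.List.pyGetD p.2 0 0) } else s
  let s := if p.1 == "restrict_data_to" then
    { s with restrict := true, restrictPeriod := s.restrictPeriod + PySem.List.pyGetD p.2 0 0 } else s
  let s := if p.1 == "ARIMA_subtract" then
    { s with arima := true, arimaParam := pvFmt p.2 } else s
  s

def GetOutlierTypes (preprocessor : List (String × List Int)) : String :=
  let st := preprocessor.foldl pvStepA
    { density := false, averagePeriod := -1, seasonal := false, seasonalPeriod := -1,
      restrict := false, restrictPeriod := 0, arima := false, arimaParam := "" }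
  let answer := ""
  let answer := if st.seasonal then answer ++ " seasonal (" ++ PySem.Int.toStr st.seasonalPeriod ++ ")" else answer
  let answer := if st.density then answer ++ " density (" ++ PySem.Int.toStr st.averagePeriod ++ ")" else answer
  let answer := if st.arima then answer ++ " ARIMA (" ++ st.arimaParam ++ ")" else answer
  let answer := answer ++ " outlier"
  let answer := if st.restrict then
    answer ++ " with comparison window restricted to last " ++ PySem.Int.toStr st.restrictPeriod ++ " datapoints"
    else answer
  let answer := PySem.Str.lstrip answer
  pvCapitalize answer

-- ===== PORT B =====
def GetOutlierTypes_alt (preprocessor : List (String × List Int)) : String :=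
  let seasonalVals := (preprocessor.filter (fun p => p.1 == "season_subtract")).map (fun p => PySem.List.pyGetD p.2 0 0)
  let averageVals := (preprocessor.filter (fun p => p.1 == "average")).map (fun p => PySem.List.pyGetD p.2 0 0)
  let restrictVals := (preprocessor.filter (fun p => p.1 == "restrict_data_to")).map (fun p => PySem.List.pyGetD p.2 0 0)
  let arimaArgs := (preprocessor.filter (fun p => p.1 == "ARIMA_subtract")).map (fun p => p.2)
  let parts : List String :=
    (if seasonalVals.isEmpty then [] else
      ["seasonal (" ++ PySem.Int.toStr ((PySem.List.max? ((-1) :: seasonalVals) (fun y => y)).getD 0) ++ ")"]) ++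
    (if averageVals.isEmpty then [] else
      ["density (" ++ PySem.Int.toStr ((PySem.List.max? ((-1) :: averageVals) (fun y => y)).getD 0) ++ ")"]) ++
    (if arimaArgs.isEmpty then [] else
      ["ARIMA ([" ++ PySem.Int.toStr (PySem.List.pyGetD (PySem.List.pyGetD arimaArgs (-1) []) 0 0) ++ "," ++
        PySem.Int.toStr (PySem.List.pyGetD (PySem.List.pyGetD arimaArgs (-1) []) 1 0) ++ "," ++
        PySem.Int.toStr (PySem.List.pyGetD (PySem.List.pyGetD arimaArgs (-1) []) 2 0) ++ "])"]) ++
    ["outlier"]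
  let answer := PySem.Str.join " " parts
  let answer := if restrictVals.isEmpty then answer else
    answer ++ " with comparison window restricted to last " ++ PySem.Int.toStr restrictVals.sum ++ " datapoints"
  pvCapitalize answer

-- ===== PRECONDITION & SPEC =====
-- Pre_ excludes exactly the inputs on which A raises IndexError: a directive of a handled
-- category whose argument list is too short (empty, or fewer than 3 entries for ARIMA_subtract).
def Pre_GetOutlierTypes (preprocessor : List (String × List Int)) : Prop :=
  ∀ p ∈ preprocessor,
    ((p.1 = "season_subtract" ∨ p.1 = "average" ∨ p.1 = "restrict_data_to") → p.2 ≠ []) ∧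
    (p.1 = "ARIMA_subtract" → 3 ≤ p.2.length)
instance (preprocessor : List (String × List Int)) : Decidable (Pre_GetOutlierTypes preprocessor) := by
  unfold Pre_GetOutlierTypes; infer_instance

def pvWitness_GetOutlierTypes : (List (String × List Int)) :=
  [("season_subtract", [7]), ("ARIMA_subtract", [1, 0, 2]), ("restrict_data_to", [50]), ("average", [3])]

def Spec_GetOutlierTypes (preprocessor : List (String × List Int)) (out : String) : Prop := out = GetOutlierTypes_alt preprocessor
instance (preprocessor : List (String × List Int)) (out : String) : Decidable (Spec_GetOutlierTypes preprocessor out) := by unfold Spec_GetOutlierTypes; infer_instance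

-- ===== CLAIM (what is proved, stated in full; the proofs are below) =====
def Claim_equal_GetOutlierTypes : Prop := ∀ (preprocessor : List (String × List Int)), Dom_GetOutlierTypes preprocessor → Pre_GetOutlierTypes preprocessor → Spec_GetOutlierTypes preprocessor (GetOutlierTypes preprocessor)

-- ===== LEMMAS AND PROOFS =====

-- the fold of A's loop, all eight state fields characterised at once
theorem pvFold_eq (l : List (String × List Int)) (s : PvStA) :
    l.foldl pvStepA s =
    { density := s.density || l.any (fun p => p.1 == "average"),
      averagePeriod := ((l.filter (fun p => p.1 == "average")).map (fun p => PySem.List.pyGetD p.2 0 0)).foldl max s.averagePeriod,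
      seasonal := s.seasonal || l.any (fun p => p.1 == "season_subtract"),
      seasonalPeriod := ((l.filter (fun p => p.1 == "season_subtract")).map (fun p => PySem.List.pyGetD p.2 0 0)).foldl max s.seasonalPeriod,
      restrict := s.restrict || l.any (fun p => p.1 == "restrict_data_to"),
      restrictPeriod := ((l.filter (fun p => p.1 == "restrict_data_to")).map (fun p => PySem.List.pyGetD p.2 0 0)).foldl (· + ·) s.restrictPeriod,
      arima := s.arima || l.any (fun p => p.1 == "ARIMA_subtract"),
      arimaParam := ((l.filter (fun p => p.1 == "ARIMA_subtract")).map (fun p => p.2)).foldl (fun _ a => pvFmt a) s.arimaParam } := by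
  induction l generalizing s with
  | nil => simp
  | cons p t ih =>
    rw [List.foldl_cons, ih]
    cases h1 : (p.1 == "season_subtract") <;>
    cases h2 : (p.1 == "average") <;>
    cases h3 : (p.1 == "restrict_data_to") <;>
    cases h4 : (p.1 == "ARIMA_subtract") <;>
    simp [pvStepA, h1, h2, h3, h4, List.any_cons]

-- emptiness of a filtered-and-mapped list is the negation of any
theorem pvIsEmpty_eq {α β : Type} (l : List α) (pred : α → Bool) (f : α → β) :
    ((l.filter pred).map f).isEmpty = !(l.any pred) := by
  cases h : l.any pred <;> simp_all [List.isEmpty_iff, List.filter_eq_nil_iff, List.any_eq_true]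

-- a fold that overwrites keeps only the last element
theorem pvFold_last {α β : Type} (f : α → β) (l : List α) (init : β) :
    l.foldl (fun _ a => f a) init = (l.getLast?).elim init f := by
  induction l generalizing init with
  | nil => simp
  | cons x t ih =>
    rw [List.foldl_cons, ih]
    cases t with
    | nil => simp
    | cons y u =>
      rw [List.getLast?_cons_cons]
      obtain ⟨z, hz⟩ := Option.isSome_iff_exists.mp
        (List.getLast?_isSome.mpr (List.cons_ne_nil y u))
      rw [hz]
      simp

theorem pvNe {α β : Type} {l : List α} {pred : α → Bool} (h : l.any pred = true) (f : α → β) :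
    (l.filter pred).map f ≠ [] := by
  simp only [ne_eq, List.map_eq_nil_iff, List.filter_eq_nil_iff, not_forall]
  simp only [List.any_eq_true] at h
  obtain ⟨x, hx, hpx⟩ := h
  exact ⟨x, hx, by simp [hpx]⟩

theorem pvSum (l : List Int) : List.foldl (fun a b => a + b) 0 l = l.sum := by
  simp [List.sum_eq_foldl]

theorem GetOutlierTypes_spec : Claim_equal_GetOutlierTypes := by
  intro l _ _
  unfold Spec_GetOutlierTypes
  simp only [GetOutlierTypes, GetOutlierTypes_alt, pvFold_eq]
  refine congrArg pvCapitalize ?_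
  rw [← String.toList_inj]
  simp only [pvIsEmpty_eq, pvFold_last, Bool.false_or, Bool.not_eq_eq_eq_not, Bool.not_true]
  by_cases hs : (l.any fun p => p.1 == "season_subtract") = true <;>
  by_cases hd : (l.any fun p => p.1 == "average") = true <;>
  by_cases ha : (l.any fun p => p.1 == "ARIMA_subtract") = true <;>
  by_cases hr : (l.any fun p => p.1 == "restrict_data_to") = true <;>
  first
  | (have hA := pvNe ha (fun p : String × List Int => p.2)
     rw [List.getLast?_eq_some_getLast hA, PySem.List.pyGetD_neg_one _ _ hA]
     simp [hs, hd, ha, hr, pvFmt, PySem.List.max?_id_cons, pvSum,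
           PySem.Str.toList_lstrip, PySem.Str.toList_join,
           PySem.Chars.lstrip, List.dropWhile, PySem.Chars.isspace,
           PySem.Chars.join_cons_cons, PySem.Chars.join_singleton])
  | simp [hs, hd, ha, hr, PySem.List.max?_id_cons, pvSum,
          PySem.Str.toList_lstrip, PySem.Str.toList_join,
          PySem.Chars.lstrip, List.dropWhile, PySem.Chars.isspace,
          PySem.Chars.join_cons_cons, PySem.Chars.join_singleton]
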